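-- pv_equiv track=rewrite | github.com/ramgorthi04/debate-card-cutter | scraper.py | extract_metadata_from_text
-- ===== SOURCE A (Python) =====
-- def extract_metadata_from_text(text):
--     lines = text.split('\n')
--     author = None
--     date_published = None
--     publisher = None
--     title = None
--     author_qualifications = None
--     body_start_index = 0
--
--     for i, line in enumerate(lines):
--         if 'author' in line.lower():
--             author = line.split(':', 1)[-1].strip()
--         elif 'published' in line.lower() or 'date' in line.lower():
--             date_published = line.split(':', 1)[-1].strip()
--         elif 'publisher' in line.lower():
--             publisher = line.split(':', 1)[-1].strip()
--         elif 'qualification' in line.lower() or 'degree' in line.lower():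
--             author_qualifications = line.split(':', 1)[-1].strip()
--         elif title is None and len(line.strip()) > 0:
--             title = line.strip()
--             body_start_index = i + 1
--
--     body_text = '\n'.join(lines[body_start_index:])
--
--     return {
--         "title": title,
--         "author": author,
--         "qualifications": author_qualifications,
--         "date": date_published,
--         "publication": publisher,
--         "body": body_text
--     }
-- ===== SOURCE B (Python) =====
-- def extract_metadata_from_text(text):
--     lines = text.split('\n')
--     keywords = ('author', 'published', 'date', 'publisher', 'qualification', 'degree')
--
--     # First pass: find the title = first non-empty line containing no field keyword.
--     title = None
--     body_start = 0
--     for i, line in enumerate(lines):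
--         low = line.lower()
--         if line.strip() and not any(k in low for k in keywords):
--             title = line.strip()
--             body_start = i + 1
--             break
--
--     # Second pass, back to front: first match wins (= last match of a forward scan).
--     author = date_published = publisher = qualifications = None
--     for line in reversed(lines):
--         low = line.lower()
--         if 'author' in low:
--             if author is None:
--                 author = line.split(':', 1)[-1].strip()
--         elif 'published' in low or 'date' in low:
--             if date_published is None:
--                 date_published = line.split(':', 1)[-1].strip()
--         elif 'publisher' in low:
--             if publisher is None:
--                 publisher = line.split(':', 1)[-1].strip()
--         elif 'qualification' in low or 'degree' in low:
--             if qualifications is None: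
--                 qualifications = line.split(':', 1)[-1].strip()
--
--     return {
--         "title": title,
--         "author": author,
--         "qualifications": qualifications,
--         "date": date_published,
--         "publication": publisher,
--         "body": '\n'.join(lines[body_start:]),
--     }
-- ===== Notes on version B (the rewrite author's own statement) =====
-- stated objective: alternative
-- what changed: A's single stateful loop (five metadata fields plus title/body_start threaded through one pass) is replaced by two independent scans: a forward scan that stops at the first non-empty keyword-free line to fix the title and body split, and a back-to-front first-wins scan over the lines for the metadata fields (equivalent to A's forward last-wins updates).
import Mathlib
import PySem

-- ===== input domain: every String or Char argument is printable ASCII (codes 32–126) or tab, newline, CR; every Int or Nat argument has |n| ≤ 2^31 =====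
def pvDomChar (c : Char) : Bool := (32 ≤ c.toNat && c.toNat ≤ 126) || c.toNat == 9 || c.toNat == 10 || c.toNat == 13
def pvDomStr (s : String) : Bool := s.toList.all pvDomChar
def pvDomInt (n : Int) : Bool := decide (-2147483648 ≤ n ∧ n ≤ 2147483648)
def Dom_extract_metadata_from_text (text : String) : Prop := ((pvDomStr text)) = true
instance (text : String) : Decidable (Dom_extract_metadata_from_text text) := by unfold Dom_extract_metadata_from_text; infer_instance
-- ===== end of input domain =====

-- B replaces A's single stateful loop by two independent scans (a forward break-scan for the
-- title/body split, and a back-to-front first-wins scan for the metadata fields): objective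
-- 'alternative' — a different decomposition of the same O(n) work, not a speed claim.

-- line.split(':', 1)[-1].strip()  (shared literal expression of both Pythons)
def pvVal (line : String) : String :=
  PySem.Str.strip (((PySem.Str.splitMax? line ":" 1).getD []).getLastD "")

-- ===== PORT A =====
-- A's for-loop: state (author, date_published, publisher, title, quals, body_start_index), index i.
def pvALoop : List String → Nat → Option String → Option String → Option String →
    Option String → Option String → Nat →
    (Option String × Option String × Option String × Option String × Option String × Nat)
  | [], _, a, d, p, t, q, bs => (a, d, p, t, q, bs)
  | line :: rest, i, a, d, p, t, q, bs =>
    if PySem.Str.isIn "author" (PySem.Str.lower line) then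
      pvALoop rest (i+1) (some (pvVal line)) d p t q bs
    else if PySem.Str.isIn "published" (PySem.Str.lower line)
         || PySem.Str.isIn "date" (PySem.Str.lower line) then
      pvALoop rest (i+1) a (some (pvVal line)) p t q bs
    else if PySem.Str.isIn "publisher" (PySem.Str.lower line) then
      pvALoop rest (i+1) a d (some (pvVal line)) t q bs
    else if PySem.Str.isIn "qualification" (PySem.Str.lower line)
         || PySem.Str.isIn "degree" (PySem.Str.lower line) then
      pvALoop rest (i+1) a d p t (some (pvVal line)) bs
    else if t.isNone && decide (0 < PySem.Str.len (PySem.Str.strip line)) then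
      pvALoop rest (i+1) a d p (some (PySem.Str.strip line)) q (i+1)
    else
      pvALoop rest (i+1) a d p t q bs

def extract_metadata_from_text (text : String) : List (String × Option String) :=
  let lines := (PySem.Str.split? text "\n").getD []
  match pvALoop lines 0 none none none none none 0 with
  | (a, d, p, t, q, bs) =>
    [("title", t), ("author", a), ("qualifications", q), ("date", d),
     ("publication", p), ("body", some (PySem.Str.join "\n" (lines.drop bs)))]

-- ===== PORT B =====
-- Source B first pass: first non-empty line containing no field keyword; returns (title, i+1).
def pvBTitle : List String → Nat → Option (String × Nat)
  | [], _ => none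
  | line :: rest, i =>
    if decide (0 < PySem.Str.len (PySem.Str.strip line))
       && !(PySem.Str.isIn "author" (PySem.Str.lower line)
         || PySem.Str.isIn "published" (PySem.Str.lower line)
         || PySem.Str.isIn "date" (PySem.Str.lower line)
         || PySem.Str.isIn "publisher" (PySem.Str.lower line)
         || PySem.Str.isIn "qualification" (PySem.Str.lower line)
         || PySem.Str.isIn "degree" (PySem.Str.lower line)) then
      some (PySem.Str.strip line, i + 1)
    else
      pvBTitle rest (i + 1)

-- Source B second pass over reversed(lines): same elif chain, each field set only if still None.
def pvRevScan : List String → Option String → Option String → Option String → Option String →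
    (Option String × Option String × Option String × Option String)
  | [], a, d, p, q => (a, d, p, q)
  | line :: rest, a, d, p, q =>
    if PySem.Str.isIn "author" (PySem.Str.lower line) then
      pvRevScan rest (if a.isNone then some (pvVal line) else a) d p q
    else if PySem.Str.isIn "published" (PySem.Str.lower line)
         || PySem.Str.isIn "date" (PySem.Str.lower line) then
      pvRevScan rest a (if d.isNone then some (pvVal line) else d) p q
    else if PySem.Str.isIn "publisher" (PySem.Str.lower line) then
      pvRevScan rest a d (if p.isNone then some (pvVal line) else p) q
    else if PySem.Str.isIn "qualification" (PySem.Str.lower line)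
         || PySem.Str.isIn "degree" (PySem.Str.lower line) then
      pvRevScan rest a d p (if q.isNone then some (pvVal line) else q)
    else
      pvRevScan rest a d p q

def extract_metadata_from_text_alt (text : String) : List (String × Option String) :=
  let lines := (PySem.Str.split? text "\n").getD []
  let tb : Option String × Nat :=
    match pvBTitle lines 0 with
    | some (s, j) => (some s, j)
    | none => (none, 0)
  match pvRevScan lines.reverse none none none none with
  | (a, d, p, q) =>
    [("title", tb.1), ("author", a), ("qualifications", q), ("date", d),
     ("publication", p), ("body", some (PySem.Str.join "\n" (lines.drop tb.2)))]

-- ===== PRECONDITION & SPEC =====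
def Spec_extract_metadata_from_text (text : String) (out : List (String × Option String)) : Prop := out = extract_metadata_from_text_alt text
instance (text : String) (out : List (String × Option String)) : Decidable (Spec_extract_metadata_from_text text out) := by unfold Spec_extract_metadata_from_text; infer_instance

-- ===== CLAIM (what is proved, stated in full; the proofs are below) =====
def Claim_equal_extract_metadata_from_text : Prop := ∀ (text : String), Dom_extract_metadata_from_text text → Spec_extract_metadata_from_text text (extract_metadata_from_text text)

-- ===== LEMMAS AND PROOFS =====

-- The elif-resolved per-field predicates (which branch a line fires).
def pvCA (l : String) : Bool := PySem.Str.isIn "author" (PySem.Str.lower l)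
def pvCD (l : String) : Bool :=
  !pvCA l && (PySem.Str.isIn "published" (PySem.Str.lower l) || PySem.Str.isIn "date" (PySem.Str.lower l))
def pvCP (l : String) : Bool :=
  !pvCA l && !(PySem.Str.isIn "published" (PySem.Str.lower l) || PySem.Str.isIn "date" (PySem.Str.lower l))
  && PySem.Str.isIn "publisher" (PySem.Str.lower l)
def pvCQ (l : String) : Bool :=
  !pvCA l && !(PySem.Str.isIn "published" (PySem.Str.lower l) || PySem.Str.isIn "date" (PySem.Str.lower l))
  && !PySem.Str.isIn "publisher" (PySem.Str.lower l)
  && (PySem.Str.isIn "qualification" (PySem.Str.lower l) || PySem.Str.isIn "degree" (PySem.Str.lower l))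

-- forward last-wins / reverse first-wins single-field steps
def pvUpd (c : String → Bool) (x : Option String) (l : String) : Option String :=
  if c l then some (pvVal l) else x
def pvStep (c : String → Bool) (x : Option String) (l : String) : Option String :=
  if c l && x.isNone then some (pvVal l) else x

theorem pvStep_some (c : String → Bool) (v : String) :
    ∀ rs, List.foldl (pvStep c) (some v) rs = some v := by
  intro rs; induction rs with
  | nil => rfl
  | cons r rs ih => simp [pvStep, ih]

theorem pvStep_rev (c : String → Bool) :
    ∀ rs, List.foldl (pvStep c) none rs = List.foldl (pvUpd c) none rs.reverse := by
  intro rs; induction rs with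
  | nil => rfl
  | cons r rs ih =>
    simp only [List.reverse_cons, List.foldl_append, List.foldl_cons, List.foldl_nil]
    by_cases h : c r
    · simp [pvStep, h, pvStep_some, pvUpd]
    · simp [pvStep, h, ih, pvUpd]

theorem pvRevScan_decomp :
    ∀ rs a d p q, pvRevScan rs a d p q =
      (List.foldl (pvStep pvCA) a rs, List.foldl (pvStep pvCD) d rs,
       List.foldl (pvStep pvCP) p rs, List.foldl (pvStep pvCQ) q rs) := by
  intro rs; induction rs with
  | nil => intro a d p q; rfl
  | cons r rs ih =>
    intro a d p q
    by_cases h1 : PySem.Str.isIn "author" (PySem.Str.lower r) <;>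
    by_cases h2 : PySem.Str.isIn "published" (PySem.Str.lower r) <;>
    by_cases h3 : PySem.Str.isIn "date" (PySem.Str.lower r) <;>
    by_cases h4 : PySem.Str.isIn "publisher" (PySem.Str.lower r) <;>
    by_cases h5 : PySem.Str.isIn "qualification" (PySem.Str.lower r) <;>
    by_cases h6 : PySem.Str.isIn "degree" (PySem.Str.lower r) <;>
    simp_all [pvRevScan, pvStep, pvCA, pvCD, pvCP, pvCQ]

-- once the title is set, A's loop only folds the four field updates; bs is frozen
theorem pvALoop_some (s : String) :
    ∀ ls i a d p q bs, pvALoop ls i a d p (some s) q bs =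
      (List.foldl (pvUpd pvCA) a ls, List.foldl (pvUpd pvCD) d ls,
       List.foldl (pvUpd pvCP) p ls, some s, List.foldl (pvUpd pvCQ) q ls, bs) := by
  intro ls; induction ls with
  | nil => intro i a d p q bs; rfl
  | cons l ls ih =>
    intro i a d p q bs
    by_cases h1 : PySem.Str.isIn "author" (PySem.Str.lower l) <;>
    by_cases h2 : PySem.Str.isIn "published" (PySem.Str.lower l) <;>
    by_cases h3 : PySem.Str.isIn "date" (PySem.Str.lower l) <;>
    by_cases h4 : PySem.Str.isIn "publisher" (PySem.Str.lower l) <;>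
    by_cases h5 : PySem.Str.isIn "qualification" (PySem.Str.lower l) <;>
    by_cases h6 : PySem.Str.isIn "degree" (PySem.Str.lower l) <;>
    simp_all [pvALoop, pvUpd, pvCA, pvCD, pvCP, pvCQ]

-- before the title is set, A's loop = field folds + B's title scan
set_option maxHeartbeats 2000000 in
theorem pvALoop_none :
    ∀ ls i a d p q bs, pvALoop ls i a d p none q bs =
      (List.foldl (pvUpd pvCA) a ls, List.foldl (pvUpd pvCD) d ls,
       List.foldl (pvUpd pvCP) p ls,
       match pvBTitle ls i with
       | some (s, j) => (some s, List.foldl (pvUpd pvCQ) q ls, j)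
       | none => (none, List.foldl (pvUpd pvCQ) q ls, bs)) := by
  intro ls; induction ls with
  | nil => intro i a d p q bs; rfl
  | cons l ls ih =>
    intro i a d p q bs
    by_cases h1 : PySem.Str.isIn "author" (PySem.Str.lower l) <;>
    by_cases h2 : PySem.Str.isIn "published" (PySem.Str.lower l) <;>
    by_cases h3 : PySem.Str.isIn "date" (PySem.Str.lower l) <;>
    by_cases h4 : PySem.Str.isIn "publisher" (PySem.Str.lower l) <;>
    by_cases h5 : PySem.Str.isIn "qualification" (PySem.Str.lower l) <;>
    by_cases h6 : PySem.Str.isIn "degree" (PySem.Str.lower l) <;>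
    by_cases hS : (0 : Int) < PySem.Str.len (PySem.Str.strip l) <;>

    simp_all [pvALoop, pvBTitle, pvALoop_some, pvUpd, pvCA, pvCD, pvCP, pvCQ]

-- ===== VERDICT (by name: the statement is the Claim_ definition above) =====
theorem extract_metadata_from_text_spec : Claim_equal_extract_metadata_from_text := by
  intro text _
  unfold Spec_extract_metadata_from_text
  unfold extract_metadata_from_text extract_metadata_from_text_alt
  simp only [pvALoop_none, pvRevScan_decomp, pvStep_rev, List.reverse_reverse]
  cases h : pvBTitle ((PySem.Str.split? text "\n").getD []) 0 with
  | none => simp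
  | some sj => cases sj; simp
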